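-- pv_equiv track=rewrite | github.com/theadityagoyal/100-Days-of-Cloud-Learning | Day03/Python dynamic_ip_hunter.py | extract_isp_descr
-- ===== SOURCE A (Python) =====
-- def extract_isp_descr(ip, whois_info):
--     if ip == "122.168.122.16":
--         for line in whois_info.splitlines():
--             if 'Airtel' in line or 'Bharti' in line or 'airtel' in line.lower():
--                 if line.lower().startswith('descr:'):
--                     return line[6:].strip()
--         descr_lines = [line[6:].strip() for line in whois_info.splitlines() if line.lower().startswith('descr:')]
--         return descr_lines[0] if descr_lines else "Unknown owner"
--     else:
--         descr_lines = [line[6:].strip() for line in whois_info.splitlines() if line.lower().startswith('descr:')]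
--         return descr_lines[0] if descr_lines else "Unknown owner"
-- ===== SOURCE B (Python) =====
-- def extract_isp_descr(ip, whois_info):
--     first_descr = None
--     first_marked = None
--     for line in whois_info.splitlines():
--         if line.lower().startswith('descr:'):
--             if first_descr is None:
--                 first_descr = line[6:].strip()
--             if first_marked is None and ('Airtel' in line or 'Bharti' in line or 'airtel' in line.lower()):
--                 first_marked = line[6:].strip()
--     if ip == "122.168.122.16" and first_marked is not None:
--         return first_marked
--     return first_descr if first_descr is not None else "Unknown owner"
-- ===== Notes on version B (the rewrite author's own statement) =====
-- stated objective: simpler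
-- what changed: One pass over splitlines tracking the first descr value and the first Airtel/Bharti-marked descr value, replacing A's separate marked-line scan plus a second full-list comprehension rebuilt in both branches.
import Mathlib
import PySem

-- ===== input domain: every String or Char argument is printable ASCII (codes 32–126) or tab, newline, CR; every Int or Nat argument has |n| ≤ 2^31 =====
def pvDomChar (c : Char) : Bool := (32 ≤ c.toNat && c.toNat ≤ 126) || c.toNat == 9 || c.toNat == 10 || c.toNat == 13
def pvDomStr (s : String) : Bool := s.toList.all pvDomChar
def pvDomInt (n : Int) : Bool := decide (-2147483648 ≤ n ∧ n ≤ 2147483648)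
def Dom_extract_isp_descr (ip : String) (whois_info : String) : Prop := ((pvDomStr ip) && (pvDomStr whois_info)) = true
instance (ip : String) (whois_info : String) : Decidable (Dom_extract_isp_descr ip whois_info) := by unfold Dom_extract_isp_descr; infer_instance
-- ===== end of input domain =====

-- B replaces A's separate marked-line scan and twice-written descr list comprehension by one
-- pass tracking the first descr value and the first marked descr value (objective: simpler).


-- shared elementary expressions of the Python source ('Airtel' in line or …, line.lower().startswith('descr:'), line[6:].strip())
def pvMark (line : String) : Bool :=
  PySem.Str.isIn "Airtel" line || PySem.Str.isIn "Bharti" line || PySem.Str.isIn "airtel" (PySem.Str.lower line)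
def pvDescr (line : String) : Bool := PySem.Str.startswith (PySem.Str.lower line) "descr:"
def pvVal (line : String) : String := PySem.Str.strip (PySem.Str.slice line (some 6) none)

-- ===== PORT A =====
-- the first for-loop of A: return on the first line that is marked AND a descr line
def pvALoop : List String → Option String
  | [] => none
  | l :: ls => if pvMark l then (if pvDescr l then some (pvVal l) else pvALoop ls) else pvALoop ls

def extract_isp_descr (ip : String) (whois_info : String) : String :=
  if ip = "122.168.122.16" then
    match pvALoop (PySem.Str.splitlines whois_info) with
    | some v => v
    | none =>
        match ((PySem.Str.splitlines whois_info).filter pvDescr).map pvVal with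
        | v :: _ => v
        | [] => "Unknown owner"
  else
    match ((PySem.Str.splitlines whois_info).filter pvDescr).map pvVal with
    | v :: _ => v
    | [] => "Unknown owner"

-- ===== PORT B =====
-- single pass carrying (first_descr, first_marked)
def pvBLoop : List String → Option String → Option String → Option String × Option String
  | [], fd, fm => (fd, fm)
  | l :: ls, fd, fm =>
    if pvDescr l then
      pvBLoop ls (if fd.isNone then some (pvVal l) else fd)
                 (if fm.isNone && pvMark l then some (pvVal l) else fm)
    else pvBLoop ls fd fm

def extract_isp_descr_alt (ip : String) (whois_info : String) : String :=
  let p := pvBLoop (PySem.Str.splitlines whois_info) none none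
  if ip = "122.168.122.16" && p.2.isSome then
    p.2.getD ""
  else
    match p.1 with
    | some v => v
    | none => "Unknown owner"

-- ===== PRECONDITION & SPEC =====
def Spec_extract_isp_descr (ip : String) (whois_info : String) (out : String) : Prop := out = extract_isp_descr_alt ip whois_info
instance (ip : String) (whois_info : String) (out : String) : Decidable (Spec_extract_isp_descr ip whois_info out) := by unfold Spec_extract_isp_descr; infer_instance

-- ===== CLAIM (what is proved, stated in full; the proofs are below) =====
def Claim_equal_extract_isp_descr : Prop := ∀ (ip : String) (whois_info : String), Dom_extract_isp_descr ip whois_info → Spec_extract_isp_descr ip whois_info (extract_isp_descr ip whois_info)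

-- ===== LEMMAS AND PROOFS =====

theorem pvBLoop_fst (ls : List String) (fd fm : Option String) :
    (pvBLoop ls fd fm).1 = match fd with
      | some v => some v
      | none => ((ls.filter pvDescr).map pvVal).head? := by
  induction ls generalizing fd fm with
  | nil => cases fd <;> simp [pvBLoop]
  | cons l ls ih =>
    by_cases hd : pvDescr l
    · cases fd <;> simp [pvBLoop, hd, ih]
    · cases fd <;> simp [pvBLoop, hd, ih]

theorem pvBLoop_snd (ls : List String) (fd fm : Option String) :
    (pvBLoop ls fd fm).2 = match fm with
      | some v => some v
      | none => pvALoop ls := by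
  induction ls generalizing fd fm with
  | nil => cases fm <;> simp [pvBLoop, pvALoop]
  | cons l ls ih =>
    by_cases hd : pvDescr l
    · by_cases hm : pvMark l
      · cases fm <;> simp [pvBLoop, pvALoop, hd, hm, ih]
      · cases fm <;> simp [pvBLoop, pvALoop, hd, hm, ih]
    · by_cases hm : pvMark l
      · cases fm <;> simp [pvBLoop, pvALoop, hd, hm, ih]
      · cases fm <;> simp [pvBLoop, pvALoop, hd, hm, ih]

-- ===== VERDICT (by name: the statement is the Claim_ definition above) =====
theorem extract_isp_descr_spec : Claim_equal_extract_isp_descr := by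
  intro ip w _
  unfold Spec_extract_isp_descr extract_isp_descr extract_isp_descr_alt
  simp only [pvBLoop_fst, pvBLoop_snd]
  by_cases hip : ip = "122.168.122.16"
  · cases hA : pvALoop (PySem.Str.splitlines w) <;>
      cases hF : ((PySem.Str.splitlines w).filter pvDescr).map pvVal <;>
      simp_all
  · cases hF : ((PySem.Str.splitlines w).filter pvDescr).map pvVal <;>
      simp_all
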